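-- pv_equiv track=rewrite | github.com/philipp-schoennenbeck/tbg-tools | helper_functions.py | get_position_in_scaffold
-- ===== SOURCE A (Python) =====
-- def get_position_in_scaffold(exon_list, position):
--     """calculates the position of the nucleotide on the scaffold"""
--     exon_length = [int(i[1]) - int(i[0])+1 for i in exon_list]
--     sum_of_exons = 0
--     for exon in range(len(exon_length)):
--         if position < sum_of_exons + exon_length[exon]:
--             return position + int(exon_list[exon][0]) - sum_of_exons
--         sum_of_exons += exon_length[exon]
--     return -1
-- ===== SOURCE B (Python) =====
-- def get_position_in_scaffold(exon_list, position):
--     """calculates the position of the nucleotide on the scaffold"""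
--     lengths = [int(end) - int(start) + 1 for start, end in exon_list]
--     cumulative = []
--     total = 0
--     for length in lengths:
--         total += length
--         cumulative.append(total)
--     # binary search: first index with cumulative[lo] > position
--     lo, hi = 0, len(cumulative)
--     while lo < hi:
--         mid = (lo + hi) // 2
--         if cumulative[mid] <= position:
--             lo = mid + 1
--         else:
--             hi = mid
--     if lo == len(cumulative):
--         return -1
--     return position + int(exon_list[lo][0]) - (cumulative[lo] - lengths[lo])
-- ===== Notes on version B (the rewrite author's own statement) =====
-- stated objective: alternative
-- what changed: B precomputes the cumulative exon-length prefix-sum array in one pass and then locates the containing exon by binary search on it, instead of A's linear first-match scan with a running sum.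
-- outside the precondition, e.g. on get_position_in_scaffold([('1', 'x')], 0): A raises ValueError, B raises ValueError; on get_position_in_scaffold([('0', '4'), ('10', '6')], 3): A returns 3, B returns -1
import Mathlib
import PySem

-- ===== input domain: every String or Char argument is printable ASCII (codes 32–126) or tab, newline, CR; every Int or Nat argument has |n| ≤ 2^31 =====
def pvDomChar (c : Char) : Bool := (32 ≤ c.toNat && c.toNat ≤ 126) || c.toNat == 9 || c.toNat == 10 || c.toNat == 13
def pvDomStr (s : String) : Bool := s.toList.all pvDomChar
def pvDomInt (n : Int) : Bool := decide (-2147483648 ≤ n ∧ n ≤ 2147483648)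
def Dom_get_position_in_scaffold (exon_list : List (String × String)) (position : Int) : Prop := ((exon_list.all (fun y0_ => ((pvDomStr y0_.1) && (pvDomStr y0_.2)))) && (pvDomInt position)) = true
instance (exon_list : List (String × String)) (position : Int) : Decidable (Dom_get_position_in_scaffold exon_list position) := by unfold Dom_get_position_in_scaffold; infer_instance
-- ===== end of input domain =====

-- B replaces A's linear first-match scan with a one-pass cumulative prefix-sum array
-- followed by a binary search for the containing exon (objective: alternative algorithm).

-- int(s), used by both ports; getD 0 is only reached outside Pre_ (where Python raises ValueError)
def pvParse (s : String) : Int := (PySem.Int.ofStr? s).getD 0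

-- ===== PORT A =====

-- A's 'for exon in range(len(exon_length))' loop; pairs = exon_length zipped with the exon starts
def pvALoop (pairs : List (Int × String)) (position sum_of_exons : Int) : Int :=
  match pairs with
  | [] => -1
  | (len, start) :: rest =>
    if position < sum_of_exons + len then position + pvParse start - sum_of_exons
    else pvALoop rest position (sum_of_exons + len)

def get_position_in_scaffold (exon_list : List (String × String)) (position : Int) : Int :=
  pvALoop (exon_list.map (fun i => (pvParse i.2 - pvParse i.1 + 1, i.1))) position 0

-- ===== PORT B =====

-- Source B's cumulative-building loop (total += length; cumulative.append(total))
def pvCumul (lengths : List Int) (total : Int) : List Int :=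
  match lengths with
  | [] => []
  | l :: rest => (total + l) :: pvCumul rest (total + l)

-- Source B's while-loop binary search; cumulative[mid] is always in range there, so getD is exact;
-- the fuel (= hi - lo, which bounds the number of iterations) only makes the recursion structural
def pvBSearchFuel (fuel : Nat) (cumulative : List Int) (position : Int) (lo hi : Nat) : Nat :=
  match fuel with
  | 0 => lo
  | fuel + 1 =>
    if lo < hi then
      let mid := (lo + hi) / 2
      if cumulative.getD mid 0 ≤ position then pvBSearchFuel fuel cumulative position (mid + 1) hi
      else pvBSearchFuel fuel cumulative position lo mid
    else lo

def pvBSearch (cumulative : List Int) (position : Int) (lo hi : Nat) : Nat :=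
  pvBSearchFuel (hi - lo) cumulative position lo hi

def get_position_in_scaffold_alt (exon_list : List (String × String)) (position : Int) : Int :=
  let lengths := exon_list.map (fun p => pvParse p.2 - pvParse p.1 + 1)
  let cumulative := pvCumul lengths 0
  let lo := pvBSearch cumulative position 0 cumulative.length
  if lo = cumulative.length then -1
  -- exon_list[lo], cumulative[lo], lengths[lo]: lo is in range in this branch, so getD is exact
  else position + pvParse ((exon_list.getD lo ("", "")).1) - (cumulative.getD lo 0 - lengths.getD lo 0)

-- ===== PRECONDITION & SPEC =====
-- Pre_ excludes (a) inputs where some exon bound fails int() — Python A raises ValueError there —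
-- and (b) inputs with a negative-length exon after the first one, which make the cumulative-length
-- array non-monotone, so A's first-match linear-scan result there is an accidental artifact of the
-- scan order that a binary search need not reproduce.
def Pre_get_position_in_scaffold (exon_list : List (String × String)) (position : Int) : Prop :=
  (∀ p ∈ exon_list, (PySem.Int.ofStr? p.1).isSome ∧ (PySem.Int.ofStr? p.2).isSome) ∧
  (∀ p ∈ exon_list.drop 1, (PySem.Int.ofStr? p.1).getD 0 ≤ (PySem.Int.ofStr? p.2).getD 0 + 1)

instance (exon_list : List (String × String)) (position : Int) : Decidable (Pre_get_position_in_scaffold exon_list position) := by unfold Pre_get_position_in_scaffold; infer_instance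

def pvWitness_get_position_in_scaffold : (List (String × String)) × Int := ([("1", "3"), ("10", "20")], 4)

def Spec_get_position_in_scaffold (exon_list : List (String × String)) (position : Int) (out : Int) : Prop := out = get_position_in_scaffold_alt exon_list position
instance (exon_list : List (String × String)) (position : Int) (out : Int) : Decidable (Spec_get_position_in_scaffold exon_list position out) := by unfold Spec_get_position_in_scaffold; infer_instance

-- ===== CLAIM (what is proved, stated in full; the proofs are below) =====
def Claim_equal_get_position_in_scaffold : Prop := ∀ (exon_list : List (String × String)) (position : Int), Dom_get_position_in_scaffold exon_list position → Pre_get_position_in_scaffold exon_list position → Spec_get_position_in_scaffold exon_list position (get_position_in_scaffold exon_list position)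

-- ===== LEMMAS AND PROOFS =====

-- proof-only helper: the index of the first cumulative sum exceeding position (= list length if none)
def pvFirstGt (c : List Int) (position : Int) : Nat :=
  match c with
  | [] => 0
  | x :: rest => if position < x then 0 else pvFirstGt rest position + 1

theorem pvCumul_length (l : List Int) : ∀ t, (pvCumul l t).length = l.length := by
  induction l with
  | nil => intro t; rfl
  | cons x r ih => intro t; simp [pvCumul, ih]

theorem pvFirstGt_le (c : List Int) (position : Int) : pvFirstGt c position ≤ c.length := by
  induction c with
  | nil => simp [pvFirstGt]
  | cons x r ih =>
    simp only [pvFirstGt, List.length_cons]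
    split <;> omega

-- characterization: pvFirstGt is the unique k bounded by length with everything before ≤ pos and, if in range, c[k] > pos
theorem pvFirstGt_eq (c : List Int) (position : Int) : ∀ (k : Nat), k ≤ c.length →
    (∀ i, i < k → c.getD i 0 ≤ position) →
    (∀ i, k ≤ i → i < c.length → position < c.getD i 0) →
    pvFirstGt c position = k := by
  induction c with
  | nil =>
    intro k hk _ _
    have : k = 0 := by simpa using hk
    subst this; rfl
  | cons x r ih =>
    intro k hk h1 h2
    match k with
    | 0 =>
      have := h2 0 (by omega) (by simp)
      simp only [List.getD_cons_zero] at this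
      simp [pvFirstGt, this]
    | k' + 1 =>
      have hx : x ≤ position := by simpa using h1 0 (by omega)
      have : ¬ position < x := by omega
      simp only [pvFirstGt, if_neg this]
      have := ih k' (by simpa using hk)
        (fun i hi => by simpa using h1 (i + 1) (by omega))
        (fun i hi hi2 => by simpa using h2 (i + 1) (by omega) (by simpa using hi2))
      omega

theorem pvCumul_ge (l : List Int) : ∀ t, (∀ L ∈ l, 0 ≤ L) → ∀ x ∈ pvCumul l t, t ≤ x := by
  induction l with
  | nil => intro t _ x hx; simp [pvCumul] at hx
  | cons L r ih =>
    intro t h x hx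
    simp only [pvCumul, List.mem_cons] at hx
    have hL : 0 ≤ L := h L (by simp)
    rcases hx with rfl | hx
    · omega
    · have := ih (t + L) (fun L' hL' => h L' (by simp [hL'])) x hx
      omega

theorem pvCumul_pairwise (l : List Int) : ∀ t, (∀ L ∈ l.drop 1, 0 ≤ L) →
    (pvCumul l t).Pairwise (· ≤ ·) := by
  induction l with
  | nil => intro t _; simp [pvCumul]
  | cons L r ih =>
    intro t h
    simp only [List.drop_one, List.tail_cons] at h
    refine List.pairwise_cons.2 ⟨pvCumul_ge r (t + L) h, ih (t + L) ?_⟩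
    intro L' hL'
    exact h L' (List.mem_of_mem_drop hL')

theorem pairwise_getD_mono (c : List Int) (h : c.Pairwise (· ≤ ·)) :
    ∀ i j, i ≤ j → j < c.length → c.getD i 0 ≤ c.getD j 0 := by
  intro i j hij hj
  rcases Nat.eq_or_lt_of_le hij with rfl | hlt
  · exact le_refl _
  · rw [List.getD_eq_getElem c 0 (by omega), List.getD_eq_getElem c 0 hj]
    exact (List.pairwise_iff_getElem.1 h) i j (by omega) hj hlt

-- binary search computes pvFirstGt on a monotone array
theorem pvBSearch_eq (c : List Int) (position : Int)
    (mono : ∀ i j, i ≤ j → j < c.length → c.getD i 0 ≤ c.getD j 0) :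
    ∀ (n lo hi : Nat), hi - lo ≤ n → lo ≤ hi → hi ≤ c.length →
    (∀ i, i < lo → c.getD i 0 ≤ position) →
    (∀ i, hi ≤ i → i < c.length → position < c.getD i 0) →
    pvBSearchFuel n c position lo hi = pvFirstGt c position := by
  intro n
  induction n with
  | zero =>
    intro lo hi hn hle hhi h1 h2
    have : lo = hi := by omega
    subst this
    exact (pvFirstGt_eq c position lo (by omega) h1 h2).symm
  | succ n ih =>
    intro lo hi hn hle hhi h1 h2
    rw [pvBSearchFuel]
    by_cases hlh : lo < hi
    · rw [if_pos hlh]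
      by_cases hm : c.getD ((lo + hi) / 2) 0 ≤ position
      · simp only [hm, if_pos]
        exact ih ((lo + hi) / 2 + 1) hi (by omega) (by omega) hhi
          (fun i hi' => le_trans (mono i ((lo + hi) / 2) (by omega) (by omega)) hm) h2
      · simp only [hm, if_false]
        exact ih lo ((lo + hi) / 2) (by omega) (by omega) (by omega) h1
          (fun i hi' hi2 => lt_of_lt_of_le (by omega) (mono ((lo + hi) / 2) i hi' hi2))
    · rw [if_neg hlh]
      have : lo = hi := by omega
      subst this
      exact (pvFirstGt_eq c position lo (by omega) h1 h2).symm

-- A's scan, characterized by pvFirstGt over the cumulative sums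
theorem pvALoop_char (pairs : List (Int × String)) : ∀ (position s : Int),
    pvALoop pairs position s =
      (let c := pvCumul (pairs.map Prod.fst) s
       let k := pvFirstGt c position
       if k = pairs.length then -1
       else position + pvParse ((pairs.getD k (0, "")).2) - (c.getD k 0 - (pairs.getD k (0, "")).1)) := by
  induction pairs with
  | nil => intro position s; rfl
  | cons hd rest ih =>
    intro position s
    obtain ⟨L, st⟩ := hd
    simp only [List.map, pvCumul, pvALoop, pvFirstGt]
    by_cases h : position < s + L
    · rw [if_pos h]
      simp only [if_pos h]
      have : (0 : Nat) ≠ rest.length + 1 := by omega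
      simp only [List.length_cons, if_neg this, List.getD_cons_zero]
      ring
    · rw [if_neg h]
      simp only [if_neg h]
      rw [ih position (s + L)]
      simp only [List.length_cons, List.getD_cons_succ]
      by_cases hk : pvFirstGt (pvCumul (rest.map Prod.fst) (s + L)) position = rest.length
      · simp [hk]
      · rw [if_neg hk, if_neg (by omega)]

-- ===== VERDICT (by name: the statement is the Claim_ definition above) =====
theorem get_position_in_scaffold_spec : Claim_equal_get_position_in_scaffold := by
  intro exon_list position _ hpre
  unfold Spec_get_position_in_scaffold get_position_in_scaffold get_position_in_scaffold_alt
  rw [pvALoop_char]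
  simp only []
  have hmapfst : (exon_list.map (fun i => (pvParse i.2 - pvParse i.1 + 1, i.1))).map Prod.fst
      = exon_list.map (fun p => pvParse p.2 - pvParse p.1 + 1) := by
    rw [List.map_map]; rfl
  have hplen : (exon_list.map (fun i => (pvParse i.2 - pvParse i.1 + 1, i.1))).length = exon_list.length := List.length_map _
  set lengths := exon_list.map (fun p => pvParse p.2 - pvParse p.1 + 1) with hlen
  set c := pvCumul lengths 0 with hc
  have hclen : c.length = exon_list.length := by
    rw [hc, pvCumul_length, hlen, List.length_map]
  have htail : ∀ L ∈ lengths.drop 1, 0 ≤ L := by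
    intro L hL
    rw [hlen, ← List.map_drop] at hL
    obtain ⟨p, hp, rfl⟩ := List.mem_map.1 hL
    have := hpre.2 p hp
    unfold pvParse
    omega
  have hmono := pairwise_getD_mono c (pvCumul_pairwise lengths 0 htail)
  have hbs : pvBSearch c position 0 c.length = pvFirstGt c position := by
    unfold pvBSearch
    exact pvBSearch_eq c position hmono (c.length - 0) 0 c.length (by omega) (by omega) (le_refl _)
      (by omega) (fun i hi1 hi2 => by omega)
  rw [hmapfst, ← hc, hbs]
  set k := pvFirstGt c position with hk
  have hkle : k ≤ c.length := pvFirstGt_le c position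
  by_cases hend : k = exon_list.length
  · rw [if_pos (by omega), if_pos (by omega)]
  · have hklt : k < exon_list.length := by omega
    rw [if_neg (by omega), if_neg (by omega)]
    rw [List.getD_eq_getElem _ _ (by omega),
        List.getD_eq_getElem _ ("", "") hklt,
        List.getD_eq_getElem lengths 0 (by rw [hlen, List.length_map]; omega)]
    simp only [List.getElem_map, hlen]
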